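-- pv_equiv track=rewrite | github.com/SergioLV/training | hackerrank/minion_game.py | pointsWithConsonants
-- ===== SOURCE A (Python) =====
-- def pointsWithConsonants(string):
--     consonants = 'qwrtypsdfghjklzxcvbnm'
--     posible_words = []
--     left = 0
--     right = 0
--     i = 0
--
--     while i < len(string):
--         if string[i] in consonants:
--             left = i
--             right = i
--             while right <= len(string):
--                 posible_words.append(string[left:right])
--                 right += 1
--         left += 1
--         i += 1
--     score = calculateScore(string, posible_words)
--
--     return score
--
-- def calculateScore(string, posible_words):
--     word_count = {}
--     score = 0
--     for word in posible_words:
--         if word != '':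
--             word_count[word] = 0
--     for word in posible_words:
--         if word != '':
--             word_count[word] += 1
--
--     for key in word_count.keys():
--         score += word_count[key]
--
--     return score
-- ===== SOURCE B (Python) =====
-- def pointsWithConsonants(string):
--     consonants = set('qwrtypsdfghjklzxcvbnm')
--     n = len(string)
--     total = 0
--     for i, c in enumerate(string):
--         if c in consonants:
--             total += n - i
--     return total
-- ===== Notes on version B (the rewrite author's own statement) =====
-- stated objective: faster
-- what changed: Instead of materialising every substring starting at each consonant position and counting them through a dictionary, B sums (len - i) directly for each consonant position in one pass.
import Mathlib
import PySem

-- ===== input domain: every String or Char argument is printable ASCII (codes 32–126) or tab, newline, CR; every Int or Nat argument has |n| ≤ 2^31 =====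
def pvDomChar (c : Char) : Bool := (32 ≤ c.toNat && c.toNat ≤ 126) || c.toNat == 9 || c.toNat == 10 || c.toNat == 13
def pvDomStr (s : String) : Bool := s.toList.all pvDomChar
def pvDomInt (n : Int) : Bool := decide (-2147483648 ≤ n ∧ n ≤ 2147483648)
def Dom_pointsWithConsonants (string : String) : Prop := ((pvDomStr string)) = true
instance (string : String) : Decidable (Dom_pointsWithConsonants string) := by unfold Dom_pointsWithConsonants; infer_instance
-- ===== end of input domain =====

-- B replaces A's materialisation of every substring starting at each consonant position
-- (and the dictionary that then counts them) by a single pass adding (len - i) per consonant position.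

-- ===== PORT A =====
def pvConsonants : List Char := "qwrtypsdfghjklzxcvbnm".toList

-- port of A's helper calculateScore (words are the substrings' character lists;
-- `word_count[word] += 1` is ported as insert of getD+1, exact since the key is always present)
def calculateScore (string : List Char) (posible_words : List (List Char)) : Int :=
  let wc1 : PySem.Dict (List Char) Int :=
    posible_words.foldl (fun d word => if word ≠ [] then d.insert word 0 else d) PySem.Dict.empty
  let wc2 : PySem.Dict (List Char) Int :=
    posible_words.foldl (fun d word => if word ≠ [] then d.insert word (d.getD word 0 + 1) else d) wc1
  wc2.keys.foldl (fun score key => score + wc2.getD key 0) 0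

-- `string[i] in consonants` for the 1-character string[i] is membership of that character
def pointsWithConsonants (string : String) : Int :=
  let s := string.toList
  let n : Int := s.length
  let st := (PySem.List.pyRange 0 n).foldl
    (fun (st : List (List Char) × Int) i =>
      if PySem.List.pyGetD s i ' ' ∈ pvConsonants then
        let left := i
        let pw := (PySem.List.pyRange left (n + 1)).foldl
          (fun pw right => pw ++ [PySem.List.slice s (some left) (some right)]) st.1
        (pw, left + 1)
      else (st.1, st.2 + 1))
    ([], 0)
  calculateScore s st.1

-- ===== PORT B =====
def pointsWithConsonants_alt (string : String) : Int :=
  let consonants : PySem.Set Char := PySem.Set.ofList "qwrtypsdfghjklzxcvbnm".toList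
  let n : Int := string.toList.length
  (PySem.List.enumerate string.toList).foldl
    (fun total p => if PySem.Set.contains consonants p.2 then total + (n - p.1) else total) 0

-- ===== PRECONDITION & SPEC =====
def Spec_pointsWithConsonants (string : String) (out : Int) : Prop := out = pointsWithConsonants_alt string
instance (string : String) (out : Int) : Decidable (Spec_pointsWithConsonants string out) := by unfold Spec_pointsWithConsonants; infer_instance

-- ===== CLAIM (what is proved, stated in full; the proofs are below) =====
def Claim_equal_pointsWithConsonants : Prop := ∀ (string : String), Dom_pointsWithConsonants string → Spec_pointsWithConsonants string (pointsWithConsonants string)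

-- ===== LEMMAS AND PROOFS =====

-- the first pass of calculateScore leaves every value at 0
lemma pvGetD_foldl_insert_zero (l : List (List Char)) (d : PySem.Dict (List Char) Int)
    (h : ∀ k, d.getD k 0 = 0) (k : List Char) :
    (l.foldl (fun d w => d.insert w 0) d).getD k 0 = 0 := by
  induction l generalizing d with
  | nil => exact h k
  | cons x t ih =>
      refine ih _ (fun k' => ?_)
      rw [PySem.Dict.getD_insert]
      split <;> simp [h]

-- A's calculateScore counts the non-empty words (with multiplicity)
lemma pvCalculateScore_eq (s : List Char) (pws : List (List Char)) :
    calculateScore s pws = ((pws.filter (fun w => decide (w ≠ []))).length : Int) := by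
  simp only [calculateScore]
  rw [PySem.List.foldl_ite_eq_foldl_filter (p := fun (w : List Char) => w ≠ [])
        (f := fun (d : PySem.Dict (List Char) Int) w => d.insert w 0)]
  rw [PySem.List.foldl_ite_eq_foldl_filter (p := fun (w : List Char) => w ≠ [])
        (f := fun (d : PySem.Dict (List Char) Int) w => d.insert w (d.getD w 0 + 1))]
  set g := pws.filter (fun w => decide (w ≠ [])) with hg
  set wc1 : PySem.Dict (List Char) Int :=
    g.foldl (fun d w => d.insert w 0) PySem.Dict.empty with hwc1
  set wc2 : PySem.Dict (List Char) Int :=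
    g.foldl (fun d w => d.insert w (d.getD w 0 + 1)) wc1 with hwc2
  have hkeys1 : wc1.keys = PySem.Set.ofList g := by
    rw [hwc1, PySem.Dict.keys_foldl_insert (f := fun _ _ => (0 : Int))]
    simp [PySem.Set.update_nil_left]
  have hkeys2 : wc2.keys = PySem.Set.ofList g := by
    rw [hwc2, PySem.Dict.keys_foldl_insert (f := fun d w => d.getD w 0 + 1), hkeys1,
        PySem.Set.update_eq_append_filter]
    have hfil : (PySem.Set.ofList g).filter (fun y => !(PySem.Set.ofList g).contains y) = [] := by
      rw [List.filter_eq_nil_iff]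
      intro y hy
      simp [PySem.Set.contains, hy]
    rw [hfil, List.append_nil]
  have hcnt : ∀ k, wc2.getD k 0 = (g.count k : Int) := by
    intro k
    rw [hwc2, PySem.Dict.getD_foldl_insert_add_one,
        pvGetD_foldl_insert_zero g PySem.Dict.empty (fun k => PySem.Dict.getD_empty k 0) k]
    ring
  rw [PySem.List.foldl_add (g := fun k => wc2.getD k 0), hkeys2,
      List.map_congr_left (fun k _ => hcnt k)]
  have hperm : (PySem.Set.ofList g).Perm g.dedup := by
    rw [List.perm_ext_iff_of_nodup (PySem.Set.nodup_ofList g) g.nodup_dedup]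
    intro a
    rw [PySem.Set.mem_ofList, List.mem_dedup]
  rw [List.Perm.sum_eq (hperm.map (fun k => (g.count k : Int)))]
  have hcongr : ∀ (k : List Char), g.count k = @List.count (List Char) instBEqOfDecidableEq k g := by
    intro k
    unfold List.count
    refine List.countP_congr (fun x _ => ?_)
    simp [beq_eq_decide]
  calc 0 + (g.dedup.map (fun k => (g.count k : Int))).sum
      = ((g.dedup.map (fun k => @List.count (List Char) instBEqOfDecidableEq k g)).sum : Int) := by
        rw [Nat.cast_list_sum, List.map_map]
        simp only [Function.comp_def, hcongr]
        ring
    _ = (g.length : Int) := by rw [List.sum_map_count_dedup_eq_length]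

-- the outer while loop accumulates, per index, the substrings produced by the inner loop
lemma pvOuter_fold (s : List Char) (n : Int) (l : List Int) (pw : List (List Char)) (a : Int) :
    (l.foldl
      (fun (st : List (List Char) × Int) i =>
        if PySem.List.pyGetD s i ' ' ∈ pvConsonants then
          let left := i
          let pw := (PySem.List.pyRange left (n + 1)).foldl
            (fun pw right => pw ++ [PySem.List.slice s (some left) (some right)]) st.1
          (pw, left + 1)
        else (st.1, st.2 + 1))
      (pw, a)).1
    = pw ++ l.flatMap (fun i =>
        if PySem.List.pyGetD s i ' ' ∈ pvConsonants then
          (PySem.List.pyRange i (n + 1)).map (fun r => PySem.List.slice s (some i) (some r))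
        else []) := by
  induction l generalizing pw a with
  | nil => simp
  | cons x t ih =>
      simp only [List.foldl_cons, List.flatMap_cons]
      split
      · rw [PySem.List.foldl_append_singleton_eq_map, ih, List.append_assoc]
      · rw [List.nil_append]
        exact ih pw (a + 1)

-- per consonant position i the inner loop contributes exactly (n - i) non-empty substrings
lemma pvInner_count (s : List Char) (i : Int) (h0 : 0 ≤ i) (hn : i < (s.length : Int)) :
    (((PySem.List.pyRange i ((s.length : Int) + 1)).map
        (fun r => PySem.List.slice s (some i) (some r))).filter (fun w => decide (w ≠ []))).length
      = ((s.length : Int) - i).toNat := by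
  have hn1 : i < (s.length : Int) + 1 := by omega
  rw [PySem.List.pyRange_one_cons hn1]
  simp only [List.map_cons, List.filter_cons]
  have hii : PySem.List.slice s (some i) (some i) = [] := by
    rw [PySem.List.slice_of_nonneg s h0 h0 (le_of_lt hn) (le_of_lt hn)]
    simp
  rw [hii]
  simp only [ne_eq, not_true_eq_false, decide_false]
  rw [List.filter_eq_self.mpr ?_]
  · rw [if_neg (by simp), List.length_map, PySem.List.length_pyRange_one]
    omega
  · intro w hw
    simp only [List.mem_map] at hw
    obtain ⟨r, hr, rfl⟩ := hw
    rw [PySem.List.mem_pyRange_one] at hr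
    rw [PySem.List.slice_of_nonneg s h0 (by omega) (le_of_lt hn) (by omega)]
    simp only [decide_eq_true_eq]
    intro hnil
    have hlen := congrArg List.length hnil
    simp only [List.length_take, List.length_drop, List.length_nil] at hlen
    omega

theorem pointsWithConsonants_eq_sum (string : String) :
    pointsWithConsonants string
      = ((PySem.List.pyRange 0 (string.toList.length : Int)).map (fun i =>
          if PySem.List.pyGetD string.toList i ' ' ∈ pvConsonants
            then (string.toList.length : Int) - i else 0)).sum := by
  simp only [pointsWithConsonants]
  rw [pvOuter_fold, pvCalculateScore_eq, List.nil_append, List.filter_flatMap,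
      List.length_flatMap, Nat.cast_list_sum, List.map_map]
  refine congrArg List.sum (List.map_congr_left (fun i hi => ?_))
  rw [PySem.List.mem_pyRange_one] at hi
  simp only [Function.comp_def]
  split
  · rw [pvInner_count string.toList i hi.1 hi.2]
    omega
  · simp

theorem pointsWithConsonants_alt_eq_sum (string : String) :
    pointsWithConsonants_alt string
      = ((PySem.List.pyRange 0 (string.toList.length : Int)).map (fun i =>
          if PySem.List.pyGetD string.toList i ' ' ∈ pvConsonants
            then (string.toList.length : Int) - i else 0)).sum := by
  simp only [pointsWithConsonants_alt]
  rw [PySem.List.enumerate_eq_map_pyRange (d := ' '), List.foldl_map]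
  have hset : ∀ (c : Char),
      PySem.Set.contains (PySem.Set.ofList "qwrtypsdfghjklzxcvbnm".toList) c
        = decide (c ∈ pvConsonants) := by
    intro c
    have h1 : PySem.Set.ofList "qwrtypsdfghjklzxcvbnm".toList = pvConsonants := by decide
    rw [h1]
    simp [PySem.Set.contains]
  refine Eq.trans (PySem.List.foldl_congr_mem _ _
      (fun acc j => acc + (if PySem.List.pyGetD string.toList j ' ' ∈ pvConsonants
          then (string.toList.length : Int) - j else 0)) 0
      (fun acc j _ => by
        show (if (PySem.Set.ofList "qwrtypsdfghjklzxcvbnm".toList).contains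
              (PySem.List.pyGetD string.toList j ' ') = true
            then acc + ((string.toList.length : Int) - j) else acc) = _
        rw [hset]
        by_cases h : PySem.List.pyGetD string.toList j ' ' ∈ pvConsonants <;> simp [h])) ?_
  rw [PySem.List.foldl_add]
  simp [PySem.List.len]

-- ===== VERDICT (by name: the statement is the Claim_ definition above) =====
theorem pointsWithConsonants_spec : Claim_equal_pointsWithConsonants := by
  intro string _
  unfold Spec_pointsWithConsonants
  rw [pointsWithConsonants_eq_sum, pointsWithConsonants_alt_eq_sum]
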